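-- pv_equiv track=rewrite | github.com/viktor-shcherb/text-labelling | src/label_app/ui/components/access_fix.py | _group_all_repos_by_owner
-- ===== SOURCE A (Python) =====
-- def _group_all_repos_by_owner(meta_by_slug: dict[str, dict]) -> dict[str, set[str]]:
--     """
--     Collect **all** mentioned repos per owner, regardless of access state.
--     { owner_login: {repo, ...}, ... }
--     """
--     by_owner: dict[str, set[str]] = {}
--     for meta in meta_by_slug.values():
--         owner = meta.get("owner")
--         repo = meta.get("repo")
--         if not owner or not repo:
--             continue
--         by_owner.setdefault(owner, set()).add(repo)
--     return by_owner
-- ===== SOURCE B (Python) =====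
-- def _group_all_repos_by_owner(meta_by_slug: dict[str, dict]) -> dict[str, set[str]]:
--     """
--     Collect **all** mentioned repos per owner, regardless of access state.
--     { owner_login: {repo, ...}, ... }
--     """
--     pairs = [(m.get("owner"), m.get("repo")) for m in meta_by_slug.values()]
--     pairs = [(o, r) for o, r in pairs if o and r]
--     owners = list(dict.fromkeys(o for o, _ in pairs))
--     return {o: {r for o2, r in pairs if o2 == o} for o in owners}
-- ===== Notes on version B (the rewrite author's own statement) =====
-- stated objective: alternative
-- what changed: Replaces A's incremental dict-of-sets hash accumulation (setdefault+add per entry) with a two-pass pipeline: first build the filtered (owner, repo) pair list, dedupe owners in first-appearance order, then form each owner's repo set by a scan of the pair list.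
import Mathlib
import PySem

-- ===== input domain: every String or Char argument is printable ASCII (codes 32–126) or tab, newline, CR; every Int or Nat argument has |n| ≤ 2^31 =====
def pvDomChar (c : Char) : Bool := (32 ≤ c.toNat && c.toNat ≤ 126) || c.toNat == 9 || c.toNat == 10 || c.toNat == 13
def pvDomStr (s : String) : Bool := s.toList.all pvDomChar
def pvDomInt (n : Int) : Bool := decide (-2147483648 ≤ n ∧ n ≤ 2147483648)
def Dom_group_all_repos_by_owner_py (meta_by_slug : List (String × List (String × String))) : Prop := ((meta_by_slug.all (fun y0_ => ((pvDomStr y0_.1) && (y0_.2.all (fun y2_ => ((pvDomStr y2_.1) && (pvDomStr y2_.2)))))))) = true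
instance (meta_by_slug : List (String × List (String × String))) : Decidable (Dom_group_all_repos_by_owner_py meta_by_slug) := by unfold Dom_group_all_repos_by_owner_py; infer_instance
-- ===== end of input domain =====

-- B replaces A's incremental dict-of-sets accumulation with a two-pass pipeline
-- (filtered pair list, owners deduped in first-appearance order, per-owner scan);
-- not faster, a genuinely different decomposition of the same grouping.

-- ===== PORT A =====
-- literal port of A: one fold over the metadata values, setdefault + in-place set add
def group_all_repos_by_owner_py (meta_by_slug : List (String × List (String × String))) : List (String × List String) :=
  (meta_by_slug.foldl (fun d p =>
      let owner := (PySem.Dict.mk p.2).get? "owner"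
      let repo := (PySem.Dict.mk p.2).get? "repo"
      -- 'if not owner or not repo: continue' — falsy = missing key (None) or ""
      if owner.getD "" = "" ∨ repo.getD "" = "" then d
      else
        -- by_owner.setdefault(owner, set()).add(repo): the set stored at owner gains repo
        let o := owner.getD ""
        let d' := d.setdefault o PySem.Set.empty
        d'.insert o (PySem.Set.add (d'.getD o PySem.Set.empty) (repo.getD ""))) PySem.Dict.empty).items

-- ===== PORT B =====
-- B-side helper: the two comprehensions building the filtered (owner, repo) pair list
def pvPairs (meta_by_slug : List (String × List (String × String))) : List (String × String) :=
  (meta_by_slug.map (fun p => ((PySem.Dict.mk p.2).get? "owner", (PySem.Dict.mk p.2).get? "repo"))).filterMap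
    (fun q => match q with
      | (some o, some r) => if o = "" ∨ r = "" then none else some (o, r)
      | _ => none)

def group_all_repos_by_owner_py_alt (meta_by_slug : List (String × List (String × String))) : List (String × List String) :=
  let pairs := pvPairs meta_by_slug
  let owners := PySem.List.dedup (pairs.map (·.1))
  owners.map (fun o => (o, PySem.Set.ofList ((pairs.filter (fun q => q.1 == o)).map (·.2))))

-- ===== PRECONDITION & SPEC =====
def Spec_group_all_repos_by_owner_py (meta_by_slug : List (String × List (String × String))) (out : List (String × List String)) : Prop := out = group_all_repos_by_owner_py_alt meta_by_slug
instance (meta_by_slug : List (String × List (String × String))) (out : List (String × List String)) : Decidable (Spec_group_all_repos_by_owner_py meta_by_slug out) := by unfold Spec_group_all_repos_by_owner_py; infer_instance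

-- ===== CLAIM (what is proved, stated in full; the proofs are below) =====
def Claim_equal_group_all_repos_by_owner_py : Prop := ∀ (meta_by_slug : List (String × List (String × String))), Dom_group_all_repos_by_owner_py meta_by_slug → Spec_group_all_repos_by_owner_py meta_by_slug (group_all_repos_by_owner_py meta_by_slug)

-- ===== LEMMAS AND PROOFS =====

-- the core accumulation step, factored for the proofs
def pvStep (d : PySem.Dict String (PySem.Set String)) (q : String × String) : PySem.Dict String (PySem.Set String) :=
  d.insert q.1 (PySem.Set.add (d.getD q.1 PySem.Set.empty) q.2)

theorem pv_setdefault_insert (d : PySem.Dict String (PySem.Set String)) (o : String) (w : PySem.Set String) :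
    (d.setdefault o PySem.Set.empty).insert o w = d.insert o w := by
  by_cases h : d.contains o = true
  · rw [PySem.Dict.setdefault_of_contains _ _ h]
  · rw [PySem.Dict.setdefault_of_not_contains _ _ (by simpa using h), PySem.Dict.insert_insert_self]

theorem pv_fold_eq (xs : List (String × List (String × String))) :
    ∀ d, xs.foldl (fun d p =>
      let owner := (PySem.Dict.mk p.2).get? "owner"
      let repo := (PySem.Dict.mk p.2).get? "repo"
      if owner.getD "" = "" ∨ repo.getD "" = "" then d
      else
        let o := owner.getD ""
        let d' := d.setdefault o PySem.Set.empty
        d'.insert o (PySem.Set.add (d'.getD o PySem.Set.empty) (repo.getD ""))) d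
      = (pvPairs xs).foldl pvStep d := by
  induction xs with
  | nil => intro d; simp [pvPairs]
  | cons x xs ih =>
    intro d
    simp only [List.foldl_cons, pvPairs, List.map_cons, List.filterMap_cons]
    rcases h1 : (PySem.Dict.mk x.2).get? "owner" with _ | o <;>
      rcases h2 : (PySem.Dict.mk x.2).get? "repo" with _ | r <;>
      simp only [Option.getD_none, Option.getD_some]
    · rw [if_pos (Or.inl trivial)]; exact ih d
    · rw [if_pos (Or.inl trivial)]; exact ih d
    · rw [if_pos (Or.inr trivial)]; exact ih d
    · by_cases ho : o = "" ∨ r = ""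
      · simp only [if_pos ho]; exact ih d
      · simp only [if_neg ho, List.foldl_cons]
        rw [ih]
        congr 1
        show (d.setdefault o PySem.Set.empty).insert o
            (PySem.Set.add ((d.setdefault o PySem.Set.empty).getD o PySem.Set.empty) r) = pvStep d (o, r)
        rw [PySem.Dict.getD_setdefault_self, pv_setdefault_insert, pvStep]

theorem pv_getD_fold (l : List (String × String)) :
    ∀ d (o : String), (l.foldl pvStep d).getD o PySem.Set.empty =
      PySem.Set.update (d.getD o PySem.Set.empty) ((l.filter (fun q => q.1 == o)).map (·.2)) := by
  induction l with
  | nil => intro d o; simp [PySem.Set.update]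
  | cons q l ih =>
    intro d o
    simp only [List.foldl_cons, List.filter_cons, ih]
    by_cases h : q.1 = o
    · simp only [h, BEq.rfl, if_pos, List.map_cons]
      have : (pvStep d q).getD o PySem.Set.empty = PySem.Set.add (d.getD o PySem.Set.empty) q.2 := by
        rw [pvStep, PySem.Dict.getD_insert, h, if_pos rfl]
      rw [this]
      simp [PySem.Set.update]
    · have hb : (q.1 == o) = false := by simpa using h
      simp only [hb, if_neg, Bool.false_eq_true, not_false_iff]
      have : (pvStep d q).getD o PySem.Set.empty = d.getD o PySem.Set.empty := by
        rw [pvStep, PySem.Dict.getD_insert, if_neg (fun hh => h hh.symm)]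
      rw [this]

theorem pv_update_nil {α : Type} [BEq α] (l : List α) :
    PySem.Set.update ([] : PySem.Set α) l = PySem.Set.ofList l := by
  rw [PySem.Set.ofList_eq_foldl]; rfl

theorem pv_keys_fold (l : List (String × String)) :
    (l.foldl pvStep PySem.Dict.empty).keys = PySem.Set.ofList (l.map (fun q => q.1)) := by
  show (List.foldl (fun d q => d.insert (Prod.fst q) (PySem.Set.add (d.getD q.1 PySem.Set.empty) q.2)) PySem.Dict.empty l).keys = _
  rw [PySem.Dict.keys_foldl_insert_key l Prod.fst
    (fun d q => PySem.Set.add (d.getD q.1 PySem.Set.empty) q.2) PySem.Dict.empty]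
  show PySem.Set.update [] (List.map Prod.fst l) = _
  rw [pv_update_nil]

theorem pv_nodup_fold (l : List (String × String)) :
    (l.foldl pvStep PySem.Dict.empty).keys.Nodup := by
  show (List.foldl (fun d q => d.insert (Prod.fst q) (PySem.Set.add (d.getD q.1 PySem.Set.empty) q.2)) PySem.Dict.empty l).keys.Nodup
  exact PySem.Dict.nodup_keys_foldl_insert_key l Prod.fst
    (fun d q => PySem.Set.add (d.getD q.1 PySem.Set.empty) q.2) PySem.Dict.empty (by simp)

-- ===== VERDICT (by name: the statement is the Claim_ definition above) =====
theorem group_all_repos_by_owner_py_spec : Claim_equal_group_all_repos_by_owner_py := by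
  intro xs _
  show group_all_repos_by_owner_py xs = group_all_repos_by_owner_py_alt xs
  simp only [group_all_repos_by_owner_py, group_all_repos_by_owner_py_alt]
  rw [pv_fold_eq, PySem.Dict.items_eq_map_keys _ (pv_nodup_fold (pvPairs xs)) PySem.Set.empty,
    pv_keys_fold, PySem.List.dedup_eq_ofList]
  apply List.map_congr_left
  intro o _
  rw [pv_getD_fold]
  show (o, PySem.Set.update ((PySem.Dict.empty : PySem.Dict String (PySem.Set String)).getD o PySem.Set.empty) _) = _
  rw [show ((PySem.Dict.empty : PySem.Dict String (PySem.Set String)).getD o PySem.Set.empty) = ([] : PySem.Set String) from rfl,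
    pv_update_nil]
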